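-- pv_equiv track=rewrite | github.com/quadseed/Docker-Tutorial | section2/main.py | data_transaction
-- ===== SOURCE A (Python) =====
-- def convert_to_dec(data: list, n: int) -> int:
--     length = len(data)
--     result = 0
--     for i in range(1, length+1):
--         result += data[-i] * pow(n, i-1)
--     return result
--
-- def convert_to_n(data: int, n: int) -> list:
--     digit = 0
--     for i in range(pow(10, 9)):
--         if data < pow(n, i):
--             digit += i
--             break
--     result = [0]*digit
--     offset = 0
--     for i in range(1, digit+1):
--         target = data // pow(n, digit-i)
--         result[offset] = target
--         offset += 1
--         data -= target * pow(n, digit-i)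
--     return result
--
-- def data_transaction(data: str, key: int, n: int) -> str:
--     input_to_int = []
--     for char in data:
--         asc = ord(char)
--         if 31 < asc & asc < 128:
--             input_to_int.append(asc-32)
--         else:
--             raise ValueError
--     c = pow(convert_to_dec(input_to_int, 95), key, n)
--     output_int = convert_to_n(c, 95)
--     result = ''.join(chr(i+32) for i in output_int)
--     return result
-- ===== SOURCE B (Python) =====
-- def data_transaction(data: str, key: int, n: int) -> str:
--     # Horner pass: base-95 value of the message
--     v = 0
--     for ch in data:
--         a = ord(ch)
--         if a < 32 or a > 127:
--             raise ValueError
--         v = v * 95 + (a - 32)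
--     c = pow(v, key, n)
--     # extract base-95 digits least-significant first, then reverse
--     digits = []
--     while c >= 1:
--         c, r = divmod(c, 95)
--         digits.append(chr(r + 32))
--     return ''.join(reversed(digits))
-- ===== Notes on version B (the rewrite author's own statement) =====
-- stated objective: faster
-- what changed: B replaces A's per-digit pow(95, i) recomputation in both directions (quadratically many bignum multiplications) by a single Horner pass for string-to-integer and a repeated-divmod loop (least-significant digit first, reversed at the end) for integer-to-string.
import Mathlib
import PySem

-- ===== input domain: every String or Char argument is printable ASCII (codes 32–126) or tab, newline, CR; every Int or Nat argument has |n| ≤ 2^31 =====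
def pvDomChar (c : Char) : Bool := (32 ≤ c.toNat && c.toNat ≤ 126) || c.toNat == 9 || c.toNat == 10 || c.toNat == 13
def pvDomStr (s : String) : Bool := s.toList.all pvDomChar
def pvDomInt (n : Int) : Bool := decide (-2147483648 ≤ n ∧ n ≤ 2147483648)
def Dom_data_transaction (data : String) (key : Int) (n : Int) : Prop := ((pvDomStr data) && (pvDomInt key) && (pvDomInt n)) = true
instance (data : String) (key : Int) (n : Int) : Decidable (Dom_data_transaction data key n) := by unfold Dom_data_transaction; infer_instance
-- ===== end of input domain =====

-- B converts string→integer by a single Horner pass and integer→string by repeated divmod,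
-- instead of A's recomputing pow(95, i) for every digit in both directions (fewer bignum
-- multiplications).

-- ===== SHARED BUILT-IN HELPER (both Pythons call the built-in pow(b, e, m)) =====
-- PySem.Int.powMod is definitionally `mod (b^e) m`, which is not evaluable for the exponents
-- Python handles here (|key| up to 2^31); fastPowMod is square-and-multiply and provably equal
-- to PySem.Int.powMod for m ≠ 0 (lemma fastPowMod_eq below, used by the proofs).
def fastPowMod (b : Int) (e : Nat) (m : Int) : Int :=
  if h : e = 0 then PySem.Int.mod 1 m
  else
    let hh := fastPowMod b (e / 2) m
    if e % 2 = 0 then PySem.Int.mod (hh * hh) m else PySem.Int.mod (hh * hh * b) m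
termination_by e
decreasing_by exact Nat.div_lt_self (Nat.pos_of_ne_zero h) (by norm_num)

-- Python pow(b, e, m): a negative exponent inverts b modulo m (the Bezout coefficient Int.gcdA
-- is congruent mod m to the inverse Python uses, hence the same result); exact for m ≠ 0 and,
-- when e < 0, gcd b m = 1 — elsewhere Python raises and Pre_ excludes the input.
def pyPow3 (b e m : Int) : Int :=
  if 0 ≤ e then fastPowMod b e.toNat m else fastPowMod (Int.gcdA b m) (-e).toNat m

-- ===== PORT A =====
-- the char loop of data_transaction: append asc-32, or ValueError (none) on a char outside 32..127
def pvToInts : List Char → List Int → Option (List Int)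
  | [], acc => some acc
  | ch :: rest, acc =>
    let asc : Int := ch.toNat
    if 31 < asc ∧ asc < 128 then pvToInts rest (acc ++ [asc - 32]) else none

def convert_to_dec (data : List Int) (n : Int) : Int :=
  -- index -i is always in range (1 ≤ i ≤ len), so the pyGetD default is never read
  (PySem.List.pyRange 1 (PySem.List.len data + 1) 1).foldl
    (fun result i => result + PySem.List.pyGetD data (-i) 0 * n ^ (i - 1).toNat) 0

-- `digit = 0; for i in range(10**9): if data < pow(n, i): digit += i; break`
def pvFindDigit (data n : Int) (i : Nat) (fuel : Nat) : Nat :=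
  match fuel with
  | 0 => 0
  | fuel + 1 => if data < n ^ i then i else pvFindDigit data n (i + 1) fuel

def convert_to_n (data : Int) (n : Int) : List Int :=
  let digit : Nat := pvFindDigit data n 0 (10 ^ 9)
  -- state: (result, offset, data); result[offset] = target (offset is always in range)
  let st := (PySem.List.pyRange 1 ((digit : Int) + 1) 1).foldl
    (fun (st : List Int × Int × Int) i =>
      let target := PySem.Int.floordiv st.2.2 (n ^ ((digit : Int) - i).toNat)
      (PySem.List.pySetD st.1 st.2.1 target, st.2.1 + 1,
       st.2.2 - target * n ^ ((digit : Int) - i).toNat))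
    (List.replicate digit 0, 0, data)
  st.1

def data_transaction (data : String) (key : Int) (n : Int) : String :=
  match pvToInts data.toList [] with
  | none => ""   -- raise ValueError (excluded by Pre_)
  | some input_to_int =>
    let c := pyPow3 (convert_to_dec input_to_int 95) key n
    let output_int := convert_to_n c 95
    String.ofList (output_int.map (fun i => Char.ofNat (i + 32).toNat))

-- ===== PORT B =====
-- one Horner step: v = v*95 + (ord(ch)-32), or ValueError (none) on a char outside 32..127
def pvHorner : Option Int → Char → Option Int
  | none, _ => none
  | some v, ch =>
    let a : Int := ch.toNat
    if a < 32 ∨ a > 127 then none else some (v * 95 + (a - 32))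

-- `while c >= 1: c, r = divmod(c, 95); digits.append(chr(r + 32))`
def pvAltDigits (c : Int) (digits : List Char) : List Char :=
  if h : 1 ≤ c then
    pvAltDigits (PySem.Int.floordiv c 95)
      (digits ++ [Char.ofNat (PySem.Int.mod c 95 + 32).toNat])
  else digits
termination_by c.toNat
decreasing_by
  rw [PySem.Int.floordiv_eq_ediv_of_pos (by norm_num : (0:Int) < 95)]
  omega

def data_transaction_alt (data : String) (key : Int) (n : Int) : String :=
  match data.toList.foldl pvHorner (some 0) with
  | none => ""   -- raise ValueError (excluded by Pre_)
  | some v =>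
    let c := pyPow3 v key n
    String.ofList (pvAltDigits c []).reverse

-- ===== PRECONDITION & SPEC =====
-- the base-95 value of the message (used only by Pre_'s invertibility clause)
def pvMsgVal (data : String) : Int :=
  (Nat.ofDigits 95 ((data.toList.map (fun c => c.toNat - 32)).reverse) : Nat)

-- Pre_ = exactly the inputs on which Python A returns: every char in 32..127 (else the explicit
-- ValueError), n ≠ 0 (else pow raises ValueError), and for a negative key the base-95 value of
-- the message must be coprime to n (else pow raises "base is not invertible").
def Pre_data_transaction (data : String) (key : Int) (n : Int) : Prop :=
  data.toList.Forall (fun c => 32 ≤ c.toNat ∧ c.toNat ≤ 127) ∧ n ≠ 0 ∧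
    (0 ≤ key ∨ Int.gcd (pvMsgVal data) n = 1)
instance (data : String) (key : Int) (n : Int) : Decidable (Pre_data_transaction data key n) := by
  unfold Pre_data_transaction; infer_instance

def pvWitness_data_transaction : String × Int × Int := ("Hi", 3, 97)

def Spec_data_transaction (data : String) (key : Int) (n : Int) (out : String) : Prop := out = data_transaction_alt data key n
instance (data : String) (key : Int) (n : Int) (out : String) : Decidable (Spec_data_transaction data key n out) := by unfold Spec_data_transaction; infer_instance

-- ===== CLAIM (what is proved, stated in full; the proofs are below) =====
def Claim_equal_data_transaction : Prop := ∀ (data : String) (key : Int) (n : Int), Dom_data_transaction data key n → Pre_data_transaction data key n → Spec_data_transaction data key n (data_transaction data key n)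

-- ===== LEMMAS AND PROOFS =====

-- ---- Python %: characterised by congruence plus the divisor-sign range ----
theorem pymod_eq_of (a r m : Int) (hm : m ≠ 0) (hd : m ∣ (a - r))
    (hr : (0 < m → 0 ≤ r ∧ r < m) ∧ (m < 0 → m < r ∧ r ≤ 0)) :
    PySem.Int.mod a m = r := by
  have hqm := PySem.Int.floordiv_mul_add_mod a m
  have hd2 : m ∣ (PySem.Int.mod a m - r) := by
    have : PySem.Int.mod a m - r = (a - r) - PySem.Int.floordiv a m * m := by linarith
    rw [this]
    exact dvd_sub hd (Dvd.intro_left _ rfl)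
  have habs : |m| ∣ (PySem.Int.mod a m - r) := (abs_dvd _ _).mpr hd2
  have hz : PySem.Int.mod a m - r = 0 := by
    apply Int.eq_zero_of_abs_lt_dvd habs
    rcases lt_or_gt_of_ne hm with hneg | hpos
    · have h1 := PySem.Int.mod_neg_bounds a hneg
      have h2 := hr.2 hneg
      rw [abs_of_neg hneg, abs_lt]; omega
    · have h1 := PySem.Int.mod_nonneg a hpos
      have h1' := PySem.Int.mod_lt a hpos
      have h2 := hr.1 hpos
      rw [abs_of_pos hpos, abs_lt]; omega
  omega

theorem pymod_range (x m : Int) :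
    (0 < m → 0 ≤ PySem.Int.mod x m ∧ PySem.Int.mod x m < m) ∧
    (m < 0 → m < PySem.Int.mod x m ∧ PySem.Int.mod x m ≤ 0) :=
  ⟨fun h => ⟨PySem.Int.mod_nonneg x h, PySem.Int.mod_lt x h⟩, fun h => PySem.Int.mod_neg_bounds x h⟩

theorem pymod_dvd_sub (x m : Int) : m ∣ (x - PySem.Int.mod x m) := by
  have := PySem.Int.floordiv_mul_add_mod x m
  exact ⟨PySem.Int.floordiv x m, by linarith [mul_comm (PySem.Int.floordiv x m) m]⟩

theorem fastPowMod_eq (b : Int) (e : Nat) (m : Int) (hm : m ≠ 0) :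
    fastPowMod b e m = PySem.Int.powMod b e m := by
  induction e using Nat.strong_induction_on with
  | _ e ih =>
    rw [fastPowMod]
    simp only [PySem.Int.powMod]
    by_cases h0 : e = 0
    · simp [h0]
    · simp only [h0, dite_false]
      have ihh0 := ih (e / 2) (Nat.div_lt_self (Nat.pos_of_ne_zero h0) (by norm_num))
      set x := b ^ (e / 2) with hx
      have hcong : m ∣ (x - PySem.Int.mod x m) := pymod_dvd_sub x m
      obtain ⟨q, hq⟩ := hcong
      have hhm : fastPowMod b (e / 2) m = x - m * q := by
        rw [ihh0, PySem.Int.powMod]; show PySem.Int.mod x m = _; omega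
      by_cases hev : e % 2 = 0
      · simp only [hev, if_true]
        rw [hhm]
        show PySem.Int.mod ((x - m*q) * (x - m*q)) m = PySem.Int.mod (b ^ e) m
        have hxe : x * x = b ^ e := by
          rw [hx, ← pow_add]; congr 1; omega
        apply pymod_eq_of _ _ _ hm
        · have : (x - m*q) * (x - m*q) - PySem.Int.mod (b ^ e) m
            = (b ^ e - PySem.Int.mod (b ^ e) m) + m * (m*q*q - 2*x*q) := by
            rw [← hxe]; ring
          rw [this]
          exact dvd_add (pymod_dvd_sub _ m) ⟨_, rfl⟩
        · exact pymod_range _ m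
      · simp only [hev, if_false]
        rw [hhm]
        show PySem.Int.mod ((x - m*q) * (x - m*q) * b) m = PySem.Int.mod (b ^ e) m
        have hxe : x * x * b = b ^ e := by
          rw [hx, ← pow_add, ← pow_succ]; congr 1; omega
        apply pymod_eq_of _ _ _ hm
        · have : (x - m*q) * (x - m*q) * b - PySem.Int.mod (b ^ e) m
            = (b ^ e - PySem.Int.mod (b ^ e) m) + m * (m*q*q*b - 2*x*q*b) := by
            rw [← hxe]; ring
          rw [this]
          exact dvd_add (pymod_dvd_sub _ m) ⟨_, rfl⟩
        · exact pymod_range _ m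

-- every value of pyPow3 is a Python remainder, hence strictly below |m|
theorem pyPow3_lt_abs (b e m : Int) (hm : m ≠ 0) : pyPow3 b e m < |m| := by
  have key : ∀ (b' : Int) (k : Nat), fastPowMod b' k m < |m| := by
    intro b' k
    rw [fastPowMod_eq b' k m hm, PySem.Int.powMod]
    rcases lt_or_gt_of_ne hm with hneg | hpos
    · have := PySem.Int.mod_neg_bounds (b' ^ k) hneg
      rw [abs_of_neg hneg]; omega
    · have := PySem.Int.mod_lt (b' ^ k) hpos
      rw [abs_of_pos hpos]; omega
  unfold pyPow3
  split <;> apply key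

-- ---- string → integer ----
theorem pvToInts_valid (cs : List Char) : ∀ (acc : List Int),
    (∀ c ∈ cs, 32 ≤ c.toNat ∧ c.toNat ≤ 127) →
    pvToInts cs acc = some (acc ++ cs.map (fun c => (c.toNat : Int) - 32)) := by
  induction cs with
  | nil => intro acc _; simp [pvToInts]
  | cons c t ih =>
    intro acc h
    have hc := h c (by simp)
    rw [pvToInts]
    rw [if_pos (by constructor <;> (push_cast; omega))]
    rw [ih _ (fun x hx => h x (by simp [hx]))]
    simp

theorem pvHorner_valid (cs : List Char) : ∀ (v : Int),
    (∀ c ∈ cs, 32 ≤ c.toNat ∧ c.toNat ≤ 127) →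
    cs.foldl pvHorner (some v) =
      some ((cs.map (fun c => (c.toNat : Int) - 32)).foldl (fun w d => w * 95 + d) v) := by
  induction cs with
  | nil => intro v _; simp
  | cons c t ih =>
    intro v h
    have hc := h c (by simp)
    simp only [List.foldl_cons, List.map_cons]
    rw [show pvHorner (some v) c = some (v * 95 + ((c.toNat : Int) - 32)) by
      rw [pvHorner]; rw [if_neg (by push_cast; omega)]]
    exact ih _ (fun x hx => h x (by simp [hx]))

theorem horner_from (l : List Int) : ∀ (a : Int),
    l.foldl (fun w d => w * 95 + d) a =
      a * 95 ^ l.length + l.foldl (fun w d => w * 95 + d) 0 := by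
  induction l with
  | nil => intro a; simp
  | cons d t ih =>
    intro a
    simp only [List.foldl_cons, List.length_cons]
    rw [ih (a * 95 + d), ih (0 * 95 + d)]
    ring

-- pyGetD at a negative index ignores a cons as long as the index reaches only the tail
theorem pyGetD_neg_cons (d : Int) (t : List Int) (i : Int) (h1 : 1 ≤ i) (h2 : i ≤ t.length) :
    PySem.List.pyGetD (d :: t) (-i) 0 = PySem.List.pyGetD t (-i) 0 := by
  obtain ⟨k, rfl⟩ : ∃ k : Nat, i = (k : Int) := ⟨i.toNat, by omega⟩
  have hk1 : 0 < k := by omega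
  have hk2 : k ≤ t.length := by omega
  rw [PySem.List.pyGetD, PySem.List.pyGetD,
    PySem.List.pyGet?_neg_natCast _ k hk1 (by simp only [List.length_cons]; omega),
    PySem.List.pyGet?_neg_natCast _ k hk1 hk2]
  simp only [List.length_cons]
  rw [show t.length + 1 - k = (t.length - k) + 1 by omega]
  rw [List.getElem?_cons_succ]

theorem convert_to_dec_eq_horner (l : List Int) :
    convert_to_dec l 95 = l.foldl (fun w d => w * 95 + d) 0 := by
  induction l with
  | nil => simp [convert_to_dec, PySem.List.pyRange_one_eq_nil]
  | cons d t ih =>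
    unfold convert_to_dec
    simp only [PySem.List.len_eq, List.length_cons]
    have hsplit : PySem.List.pyRange 1 (((t.length + 1 : Nat) : Int) + 1) 1
        = PySem.List.pyRange 1 ((t.length : Int) + 1) 1 ++ [((t.length : Nat) : Int) + 1] := by
      rw [show (((t.length + 1 : Nat) : Int) + 1) = ((t.length : Int) + 1) + 1 by push_cast; ring]
      exact PySem.List.pyRange_one_succ_right (by omega)
    rw [hsplit, List.foldl_append]
    rw [PySem.List.foldl_congr_mem _
      (fun result i => result + PySem.List.pyGetD (d :: t) (-i) 0 * (95:Int) ^ (i - 1).toNat)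
      (fun result i => result + PySem.List.pyGetD t (-i) 0 * (95:Int) ^ (i - 1).toNat)
      0
      (by
        intro acc x hx
        rw [PySem.List.mem_pyRange_one] at hx
        dsimp only
        rw [pyGetD_neg_cons d t x hx.1 (by omega)])]
    have hlast : PySem.List.pyGetD (d :: t) (-(((t.length : Nat) : Int) + 1)) 0 = d := by
      rw [PySem.List.pyGetD, show (-(((t.length : Nat) : Int) + 1)) = -(((t.length + 1 : Nat) : Int)) by push_cast; ring,
        PySem.List.pyGet?_neg_natCast _ (t.length + 1) (by omega) (by simp)]
      simp
    simp only [List.foldl_cons, List.foldl_nil]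
    rw [hlast]
    have hconv : convert_to_dec t 95 = (PySem.List.pyRange 1 ((t.length : Int) + 1) 1).foldl
        (fun result i => result + PySem.List.pyGetD t (-i) 0 * (95:Int) ^ (i - 1).toNat) 0 := by
      unfold convert_to_dec; simp
    rw [← hconv, ih, horner_from t (0 * 95 + d)]
    have he : ((((t.length : Nat) : Int) + 1) - 1).toNat = t.length := by omega
    rw [he]
    ring

-- ---- integer → string ----
-- base-95 digits, least significant first (B's loop order)
def natLsb (m : Nat) : List Nat :=
  if h : m = 0 then [] else m % 95 :: natLsb (m / 95)
termination_by m
decreasing_by exact Nat.div_lt_self (Nat.pos_of_ne_zero h) (by norm_num)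

-- base-95 digits of m, k positions, most significant first (A's loop order)
def natMsb : Nat → Nat → List Nat
  | 0, _ => []
  | k + 1, m => m / 95 ^ k :: natMsb k (m % 95 ^ k)

theorem natLsb_eq_digits (m : Nat) : natLsb m = Nat.digits 95 m := by
  induction m using Nat.strong_induction_on with
  | _ m ih =>
    rw [natLsb]
    by_cases h : m = 0
    · simp [h]
    · rw [dif_neg h, Nat.digits_def' (by norm_num : 1 < 95) (Nat.pos_of_ne_zero h),
        ih (m / 95) (Nat.div_lt_self (Nat.pos_of_ne_zero h) (by norm_num))]

theorem lt_pow_iff_natLsb_len_le (m k : Nat) : m < 95 ^ k ↔ (natLsb m).length ≤ k := by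
  rw [natLsb_eq_digits]
  exact Iff.symm (Nat.digits_length_le_iff (by norm_num) m)

theorem natMsb_succ (k : Nat) : ∀ m : Nat, m < 95 ^ (k + 1) →
    natMsb (k + 1) m = natMsb k (m / 95) ++ [m % 95] := by
  induction k with
  | zero =>
    intro m hm
    simp [natMsb, Nat.mod_eq_of_lt (by simpa using hm)]
  | succ k ih =>
    intro m hm
    show m / 95 ^ (k + 1) :: natMsb (k + 1) (m % 95 ^ (k + 1))
      = (m / 95 / 95 ^ k :: natMsb k (m / 95 % 95 ^ k)) ++ [m % 95]
    have h1 : m / 95 / 95 ^ k = m / 95 ^ (k + 1) := by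
      rw [Nat.div_div_eq_div_mul, pow_succ, mul_comm (95 ^ k) 95]
    have h2 : m % 95 ^ (k + 1) < 95 ^ (k + 1) := Nat.mod_lt _ (by positivity)
    rw [ih (m % 95 ^ (k + 1)) h2]
    have h3 : m % 95 ^ (k + 1) / 95 = m / 95 % 95 ^ k := by
      rw [pow_succ, mul_comm]
      exact Nat.mod_mul_right_div_self m 95 (95 ^ k)
    have h4 : m % 95 ^ (k + 1) % 95 = m % 95 :=
      Nat.mod_mod_of_dvd m (dvd_pow_self 95 (Nat.succ_ne_zero k))
    rw [h1, h3, h4]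
    simp

theorem natMsb_reverse (k : Nat) : ∀ m : Nat, m < 95 ^ k →
    (natMsb k m).reverse = natLsb m ++ List.replicate (k - (natLsb m).length) 0 := by
  induction k with
  | zero =>
    intro m hm
    have : m = 0 := by omega
    subst this
    simp [natMsb, natLsb]
  | succ k ih =>
    intro m hm
    rw [natMsb_succ k m hm, List.reverse_append]
    have hdiv : m / 95 < 95 ^ k := by
      rw [Nat.div_lt_iff_lt_mul (by norm_num)]
      calc m < 95 ^ (k + 1) := hm
        _ = 95 ^ k * 95 := by ring
    rw [ih (m / 95) hdiv]
    by_cases h : m = 0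
    · subst h
      simp [natLsb, List.replicate_succ]
    · have hpos : natLsb m = m % 95 :: natLsb (m / 95) := by rw [natLsb, dif_neg h]
      rw [hpos]
      simp only [List.length_cons, List.reverse_singleton, List.cons_append]
      rw [show k + 1 - ((natLsb (m / 95)).length + 1) = k - (natLsb (m / 95)).length from by omega]
      simp

theorem lt_pow_iff_int (c : Int) (k : Nat) : c < (95 : Int) ^ k ↔ (natLsb c.toNat).length ≤ k := by
  rw [← lt_pow_iff_natLsb_len_le]
  have h1 : ((95 ^ k : Nat) : Int) = (95 : Int) ^ k := by push_cast; ring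
  constructor
  · intro h
    by_cases hc : 0 ≤ c
    · have h2 : (c.toNat : Int) < ((95 ^ k : Nat) : Int) := by
        rw [h1, Int.toNat_of_nonneg hc]; exact h
      exact_mod_cast h2
    · have h2 : c.toNat = 0 := by omega
      rw [h2]; positivity
  · intro h
    have h2 : (c.toNat : Int) < ((95 ^ k : Nat) : Int) := by exact_mod_cast h
    rw [h1] at h2
    omega

theorem pvFindDigit_eq (c : Int) : ∀ (fuel i : Nat),
    i ≤ (natLsb c.toNat).length → (natLsb c.toNat).length < i + fuel →
    pvFindDigit c 95 i fuel = (natLsb c.toNat).length := by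
  intro fuel
  induction fuel with
  | zero => intro i h1 h2; omega
  | succ fuel ih =>
    intro i h1 h2
    rw [pvFindDigit]
    by_cases h : c < (95 : Int) ^ i
    · rw [if_pos h]
      have := (lt_pow_iff_int c i).mp h
      omega
    · rw [if_neg h]
      have hgt : (natLsb c.toNat).length > i := by
        by_contra hc
        exact h ((lt_pow_iff_int c i).mpr (by omega))
      exact ih (i + 1) (by omega) (by omega)

theorem convert_to_n_fold (digit : Nat) : ∀ (k j : Nat) (pre : List Int) (m : Nat),
    j + k = digit → pre.length = j → m < 95 ^ k →
    (PySem.List.pyRange ((j : Int) + 1) ((digit : Int) + 1) 1).foldl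
      (fun (st : List Int × Int × Int) i =>
        let target := PySem.Int.floordiv st.2.2 ((95 : Int) ^ (((digit : Int)) - i).toNat)
        (PySem.List.pySetD st.1 st.2.1 target, st.2.1 + 1,
         st.2.2 - target * (95 : Int) ^ (((digit : Int)) - i).toNat))
      (pre ++ List.replicate k 0, (j : Int), (m : Int))
    = (pre ++ (natMsb k m).map (fun r : Nat => (r : Int)), (digit : Int), 0) := by
  intro k
  induction k with
  | zero =>
    intro j pre m hjk hlen hm
    have hj : j = digit := by omega
    have hm0 : m = 0 := by omega
    subst hj hm0
    rw [PySem.List.pyRange_one_eq_nil (by omega)]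
    simp [natMsb]
  | succ k ih =>
    intro j pre m hjk hlen hm
    rw [PySem.List.pyRange_one_cons (by omega : ((j:Int) + 1) < (digit : Int) + 1)]
    rw [List.foldl_cons]
    have hexp : (((digit : Int)) - ((j : Int) + 1)).toNat = k := by omega
    have hpow : (95 : Int) ^ k = ((95 ^ k : Nat) : Int) := by push_cast; ring
    have htgt : PySem.Int.floordiv (m : Int) ((95 : Int) ^ k) = ((m / 95 ^ k : Nat) : Int) := by
      rw [hpow]; exact PySem.Int.floordiv_natCast m (95 ^ k)
    have hset : PySem.List.pySetD (pre ++ List.replicate (k + 1) 0) ((j : Int)) ((m / 95 ^ k : Nat) : Int)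
        = pre ++ (((m / 95 ^ k : Nat) : Int) :: List.replicate k 0) := by
      rw [show ((j : Int)) = ((pre.length : Nat) : Int) by rw [hlen]]
      rw [PySem.List.pySetD_natCast]
      rw [List.replicate_succ]
      rw [List.set_append_right _ _ (by omega)]
      simp
    have hdata : (m : Int) - ((m / 95 ^ k : Nat) : Int) * (95 : Int) ^ k = ((m % 95 ^ k : Nat) : Int) := by
      rw [hpow]
      have := Nat.div_add_mod m (95 ^ k)
      push_cast
      push_cast at this
      nlinarith [this]
    simp only [hexp, htgt, hset, hdata]
    have hcast : (j : Int) + 1 = ((j + 1 : Nat) : Int) := by push_cast; ring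
    rw [hcast]
    have := ih (j + 1) (pre ++ [((m / 95 ^ k : Nat) : Int)]) (m % 95 ^ k)
      (by omega) (by simp; omega) (Nat.mod_lt _ (by positivity))
    simp only [List.append_assoc, List.singleton_append] at this ⊢
    rw [this]
    rw [show natMsb (k + 1) m = m / 95 ^ k :: natMsb k (m % 95 ^ k) from rfl, List.map_cons]

theorem convert_to_n_eq (c : Int) (hc : c < (95:Int) ^ 5) :
    convert_to_n c 95 = (natMsb (natLsb c.toNat).length c.toNat).map (fun r : Nat => (r : Int)) := by
  have hlen5 : (natLsb c.toNat).length ≤ 5 := (lt_pow_iff_int c 5).mp hc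
  have hdig : pvFindDigit c 95 0 (10 ^ 9) = (natLsb c.toNat).length :=
    pvFindDigit_eq c (10 ^ 9) 0 (by omega) (by norm_num; omega)
  simp only [convert_to_n]
  rw [hdig]
  by_cases hneg : 1 ≤ c
  · have hmlt : c.toNat < 95 ^ (natLsb c.toNat).length := by
      have := (lt_pow_iff_int c (natLsb c.toNat).length).mpr (le_refl _)
      have hp : ((95 ^ (natLsb c.toNat).length : Nat) : Int) = (95:Int) ^ (natLsb c.toNat).length := by push_cast; ring
      omega
    have hfold := convert_to_n_fold (natLsb c.toNat).length (natLsb c.toNat).length 0 [] c.toNat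
      (by omega) rfl hmlt
    simp only [List.nil_append, Nat.cast_zero, zero_add] at hfold
    have hc' : ((c.toNat : Nat) : Int) = c := by omega
    rw [hc'] at hfold
    rw [hfold]
  · have h0 : c.toNat = 0 := by omega
    have : natLsb 0 = [] := by rw [natLsb]; simp
    rw [h0, this]
    simp only [List.length_nil]
    rw [PySem.List.pyRange_one_eq_nil (by omega)]
    simp [natMsb]

theorem pvAltDigits_eq (c : Int) (acc : List Char) :
    pvAltDigits c acc = acc ++ (natLsb c.toNat).map (fun r : Nat => Char.ofNat (r + 32)) := by
  induction c, acc using pvAltDigits.induct with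
  | case1 c acc h ih =>
    rw [pvAltDigits, dif_pos h]
    rw [ih]
    have h1 : PySem.Int.floordiv c 95 = ((c.toNat / 95 : Nat) : Int) := by
      rw [show c = ((c.toNat : Nat) : Int) by omega]
      exact PySem.Int.floordiv_natCast c.toNat 95
    have h2 : PySem.Int.mod c 95 = ((c.toNat % 95 : Nat) : Int) := by
      rw [show c = ((c.toNat : Nat) : Int) by omega]
      exact PySem.Int.mod_natCast c.toNat 95
    rw [h1, h2]
    have h3 : (((c.toNat / 95 : Nat) : Int)).toNat = c.toNat / 95 := by omega
    rw [h3]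
    have h4 : ((((c.toNat % 95 : Nat) : Int)) + 32).toNat = c.toNat % 95 + 32 := by omega
    rw [h4]
    have h5 : natLsb c.toNat = c.toNat % 95 :: natLsb (c.toNat / 95) := by
      rw [natLsb, dif_neg (by omega)]
    rw [h5]
    simp
  | case2 c acc h =>
    rw [pvAltDigits, dif_neg h]
    have : c.toNat = 0 := by omega
    rw [this, show natLsb 0 = [] by rw [natLsb]; simp]
    simp

-- ===== VERDICT (by name: the statement is the Claim_ definition above) =====
theorem data_transaction_spec : Claim_equal_data_transaction := by
  intro data key n hdom hpre
  obtain ⟨hchars', hn, -⟩ := hpre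
  have hchars : ∀ c ∈ data.toList, 32 ≤ c.toNat ∧ c.toNat ≤ 127 :=
    List.forall_iff_forall_mem.mp hchars'
  have hnb : -2147483648 ≤ n ∧ n ≤ 2147483648 := by
    simp only [Dom_data_transaction, pvDomInt, Bool.and_eq_true, decide_eq_true_eq] at hdom
    exact hdom.2
  unfold Spec_data_transaction
  have hA := pvToInts_valid data.toList [] hchars
  simp only [List.nil_append] at hA
  have hB := pvHorner_valid data.toList 0 hchars
  simp only [data_transaction, data_transaction_alt, hA, hB]
  rw [convert_to_dec_eq_horner]
  set c := pyPow3 ((data.toList.map (fun c => (c.toNat : Int) - 32)).foldl (fun w d => w * 95 + d) 0) key n with hc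
  have hc5 : c < (95:Int) ^ 5 := by
    have h1 := pyPow3_lt_abs ((data.toList.map (fun c => (c.toNat : Int) - 32)).foldl (fun w d => w * 95 + d) 0) key n hn
    rw [← hc] at h1
    have habs : |n| ≤ 2147483648 := abs_le.mpr hnb
    have h2 : c < 2147483649 := by omega
    have h3 : (2147483649 : Int) < (95:Int) ^ 5 := by norm_num
    omega
  rw [convert_to_n_eq c hc5, pvAltDigits_eq c []]
  have hmlt : c.toNat < 95 ^ (natLsb c.toNat).length :=
    (lt_pow_iff_natLsb_len_le c.toNat (natLsb c.toNat).length).mpr (le_refl _)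
  have hmsb : natMsb (natLsb c.toNat).length c.toNat = (natLsb c.toNat).reverse := by
    have h1 := natMsb_reverse (natLsb c.toNat).length c.toNat hmlt
    simp only [Nat.sub_self, List.replicate_zero, List.append_nil] at h1
    simpa using congrArg List.reverse h1
  rw [hmsb]
  simp only [List.nil_append, List.map_reverse, List.map_map]
  have hfun : ∀ r ∈ natLsb c.toNat,
      ((fun i => Char.ofNat (i + 32).toNat) ∘ fun r : Nat => (r : Int)) r
        = (fun r : Nat => Char.ofNat (r + 32)) r := by
    intro r _
    simp only [Function.comp_apply]
    rw [show (((r : Nat) : Int) + 32).toNat = r + 32 from by omega]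
  rw [List.map_congr_left hfun]
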